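-- pv_equiv track=rewrite | github.com/openstates/openstates-scrapers | openstates/hi/events.py | get_chamber_cmte_type
-- ===== SOURCE A (Python) =====
-- cmte_lookup = {
--     'lower' : (
--         {'cmte_abbv' : 'AGR', 'cmte_name' : 'Agriculture'},
--         {'cmte_abbv' : 'CPC', 'cmte_name' : 'Consumer Protection & Commerce'},
--         {'cmte_abbv' : 'COHDWS', 'cmte_name' : 'County of Hawaii Department of Water Supply' },
--         {'cmte_abbv' : 'CUA', 'cmte_name' : 'Culture & the Arts'},
--         {'cmte_abbv' : 'EBM', 'cmte_name' : 'Economic Revitalization, Business and Military Affairs'},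
--         {'cmte_abbv' : 'EDN', 'cmte_name' : 'Education'},
--         {'cmte_abbv' : 'EEP', 'cmte_name' : 'Energy & Environmental Protection'},
--         {'cmte_abbv' : 'ERB', 'cmte_name' : 'Economic Revitalization & Business'},
--         {'cmte_abbv' : 'FIN', 'cmte_name' : 'Finance'},
--         {'cmte_abbv' : 'HAW', 'cmte_name' : 'Hawaiian Affairs'},
--         {'cmte_abbv' : 'HED', 'cmte_name' : 'Higher Education'},
--         {'cmte_abbv' : 'HLT', 'cmte_name' : 'Health'},
--         {'cmte_abbv' : 'HSG', 'cmte_name' : 'Housing'},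
--         {'cmte_abbv' : 'HUS', 'cmte_name' : 'Human Services'},
--         {'cmte_abbv' : 'INT', 'cmte_name' : 'International Affairs'},
--         {'cmte_abbv' : 'JUD', 'cmte_name' : 'Judiciary'},
--         {'cmte_abbv' : 'LAB', 'cmte_name' : 'Labor & Public Employment'},
--         {'cmte_abbv' : 'LMG', 'cmte_name' : 'Legislative Management'},
--         {'cmte_abbv' : 'PBM', 'cmte_name' : 'Public Safety & Military Affairs'},
--         {'cmte_abbv' : 'TOU', 'cmte_name' : 'Tourism'},
--         {'cmte_abbv' : 'TRN', 'cmte_name' : 'Transportation'},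
--         {'cmte_abbv' : 'WLO', 'cmte_name' : 'Water, Land, & Ocean Resources'}
--     ),
--     'upper' : (
--         {'cmte_abbv' : 'AGL', 'cmte_name' : 'Agriculture'},
--         {'cmte_abbv' : 'CPN', 'cmte_name' : 'Commerce and Consumer Protection'},
--         {'cmte_abbv' : 'CSGTF', 'cmte_name' : 'Charter School Governance, Accountability, and Authority Task Force'},
--         {'cmte_abbv' : 'EDU', 'cmte_name' : 'Education'},
--         {'cmte_abbv' : 'EGH', 'cmte_name' : 'Economic Development, Government Operations and Housing'},
--         {'cmte_abbv' : 'EDT', 'cmte_name' : 'Economic Development and Technology'},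
--         {'cmte_abbv' : 'ENE', 'cmte_name' : 'Energy and Environment'},
--         {'cmte_abbv' : 'HMS', 'cmte_name' : 'Human Services'},
--         {'cmte_abbv' : 'HRE', 'cmte_name' : 'Higher Education'},
--         {'cmte_abbv' : 'HTH', 'cmte_name' : 'Health'},
--         {'cmte_abbv' : 'HWN', 'cmte_name' : 'Hawaiian Affairs'},
--         {'cmte_abbv' : 'JDL', 'cmte_name' : 'Judiciary and Labor'},
--         {'cmte_abbv' : 'PGM', 'cmte_name' : 'Public Safety, Government Operations, and Military Affairs'},
--         {'cmte_abbv' : 'PSM', 'cmte_name' : 'Public Safety, Intergovernmental and Military Affairs'},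
--         {'cmte_abbv' : 'TEC', 'cmte_name' : 'Technology and the Arts'},
--         {'cmte_abbv' : 'THA', 'cmte_name' : 'Tourism and Hawaiian Affairs'},
--         {'cmte_abbv' : 'TIA', 'cmte_name' : 'Transportation and International Affairs'},
--         {'cmte_abbv' : 'TSM', 'cmte_name' : 'Tourism'},
--         {'cmte_abbv' : 'SCA01', 'cmte_name' : 'Special Committee On Accountability - 1'},
--         {'cmte_abbv' : 'SCA02', 'cmte_name' : 'Special Committee On Accountability - 2'},
--         {'cmte_abbv' : 'WAM', 'cmte_name' : 'Ways and Means'},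
--         {'cmte_abbv' : 'WTL', 'cmte_name' : 'Water and Land'},
--         {'cmte_abbv' : 'WLH', 'cmte_name' : 'Water, Land, and Housing'}
--     ),
--     'joint' : (
--         {'cmte_abbv' : 'ESPO', 'cmte_name' : 'Economic Stimulus Program Oversight'},
--         {'cmte_abbv' : 'IFTF', 'cmte_name' : 'Illegal Fireworks Task Force'},
--         {'cmte_abbv' : 'MBTF', 'cmte_name' : 'Medicaid Buy-In Task Force'},
--         {'cmte_abbv' : 'SLARS', 'cmte_name' : 'Student Loan Auction Rate Securities'}
--     )
-- }
--
-- def get_chamber_cmte_type(committees):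
--
--     chambers = []
--
--     for committee in committees:
--         if committee in [c['cmte_abbv'] for c in cmte_lookup['lower']]:
--             chambers.append('House')
--         if committee in [c['cmte_abbv'] for c in cmte_lookup['upper']]:
--             chambers.append('Senate')
--         if committee in [c['cmte_abbv'] for c in cmte_lookup['joint']]:
--             chambers.append('Joint')
--
--     chambers = set(chambers)
--
--     if len(chambers) == 1:
--         return chambers.pop()
--     elif len(chambers) > 1:
--         return 'Joint'
--     else:
--         return ''
-- ===== SOURCE B (Python) =====
-- cmte_lookup = {
--     'lower' : (
--         {'cmte_abbv' : 'AGR', 'cmte_name' : 'Agriculture'},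
--         {'cmte_abbv' : 'CPC', 'cmte_name' : 'Consumer Protection & Commerce'},
--         {'cmte_abbv' : 'COHDWS', 'cmte_name' : 'County of Hawaii Department of Water Supply' },
--         {'cmte_abbv' : 'CUA', 'cmte_name' : 'Culture & the Arts'},
--         {'cmte_abbv' : 'EBM', 'cmte_name' : 'Economic Revitalization, Business and Military Affairs'},
--         {'cmte_abbv' : 'EDN', 'cmte_name' : 'Education'},
--         {'cmte_abbv' : 'EEP', 'cmte_name' : 'Energy & Environmental Protection'},
--         {'cmte_abbv' : 'ERB', 'cmte_name' : 'Economic Revitalization & Business'},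
--         {'cmte_abbv' : 'FIN', 'cmte_name' : 'Finance'},
--         {'cmte_abbv' : 'HAW', 'cmte_name' : 'Hawaiian Affairs'},
--         {'cmte_abbv' : 'HED', 'cmte_name' : 'Higher Education'},
--         {'cmte_abbv' : 'HLT', 'cmte_name' : 'Health'},
--         {'cmte_abbv' : 'HSG', 'cmte_name' : 'Housing'},
--         {'cmte_abbv' : 'HUS', 'cmte_name' : 'Human Services'},
--         {'cmte_abbv' : 'INT', 'cmte_name' : 'International Affairs'},
--         {'cmte_abbv' : 'JUD', 'cmte_name' : 'Judiciary'},
--         {'cmte_abbv' : 'LAB', 'cmte_name' : 'Labor & Public Employment'},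
--         {'cmte_abbv' : 'LMG', 'cmte_name' : 'Legislative Management'},
--         {'cmte_abbv' : 'PBM', 'cmte_name' : 'Public Safety & Military Affairs'},
--         {'cmte_abbv' : 'TOU', 'cmte_name' : 'Tourism'},
--         {'cmte_abbv' : 'TRN', 'cmte_name' : 'Transportation'},
--         {'cmte_abbv' : 'WLO', 'cmte_name' : 'Water, Land, & Ocean Resources'}
--     ),
--     'upper' : (
--         {'cmte_abbv' : 'AGL', 'cmte_name' : 'Agriculture'},
--         {'cmte_abbv' : 'CPN', 'cmte_name' : 'Commerce and Consumer Protection'},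
--         {'cmte_abbv' : 'CSGTF', 'cmte_name' : 'Charter School Governance, Accountability, and Authority Task Force'},
--         {'cmte_abbv' : 'EDU', 'cmte_name' : 'Education'},
--         {'cmte_abbv' : 'EGH', 'cmte_name' : 'Economic Development, Government Operations and Housing'},
--         {'cmte_abbv' : 'EDT', 'cmte_name' : 'Economic Development and Technology'},
--         {'cmte_abbv' : 'ENE', 'cmte_name' : 'Energy and Environment'},
--         {'cmte_abbv' : 'HMS', 'cmte_name' : 'Human Services'},
--         {'cmte_abbv' : 'HRE', 'cmte_name' : 'Higher Education'},
--         {'cmte_abbv' : 'HTH', 'cmte_name' : 'Health'},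
--         {'cmte_abbv' : 'HWN', 'cmte_name' : 'Hawaiian Affairs'},
--         {'cmte_abbv' : 'JDL', 'cmte_name' : 'Judiciary and Labor'},
--         {'cmte_abbv' : 'PGM', 'cmte_name' : 'Public Safety, Government Operations, and Military Affairs'},
--         {'cmte_abbv' : 'PSM', 'cmte_name' : 'Public Safety, Intergovernmental and Military Affairs'},
--         {'cmte_abbv' : 'TEC', 'cmte_name' : 'Technology and the Arts'},
--         {'cmte_abbv' : 'THA', 'cmte_name' : 'Tourism and Hawaiian Affairs'},
--         {'cmte_abbv' : 'TIA', 'cmte_name' : 'Transportation and International Affairs'},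
--         {'cmte_abbv' : 'TSM', 'cmte_name' : 'Tourism'},
--         {'cmte_abbv' : 'SCA01', 'cmte_name' : 'Special Committee On Accountability - 1'},
--         {'cmte_abbv' : 'SCA02', 'cmte_name' : 'Special Committee On Accountability - 2'},
--         {'cmte_abbv' : 'WAM', 'cmte_name' : 'Ways and Means'},
--         {'cmte_abbv' : 'WTL', 'cmte_name' : 'Water and Land'},
--         {'cmte_abbv' : 'WLH', 'cmte_name' : 'Water, Land, and Housing'}
--     ),
--     'joint' : (
--         {'cmte_abbv' : 'ESPO', 'cmte_name' : 'Economic Stimulus Program Oversight'},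
--         {'cmte_abbv' : 'IFTF', 'cmte_name' : 'Illegal Fireworks Task Force'},
--         {'cmte_abbv' : 'MBTF', 'cmte_name' : 'Medicaid Buy-In Task Force'},
--         {'cmte_abbv' : 'SLARS', 'cmte_name' : 'Student Loan Auction Rate Securities'}
--     )
-- }
--
--
-- def get_chamber_cmte_type(committees):
--     # Transposed: one pass per chamber over precomputed abbreviation sets,
--     # instead of A's per-committee loop rebuilding three lists each iteration.
--     committees = list(committees)
--     abbv_sets = {chamber: {d['cmte_abbv'] for d in table}
--                  for chamber, table in cmte_lookup.items()}
--     labels = [label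
--               for label, key in (('House', 'lower'), ('Senate', 'upper'), ('Joint', 'joint'))
--               if any(c in abbv_sets[key] for c in committees)]
--     if len(labels) == 1:
--         return labels[0]
--     if len(labels) > 1:
--         return 'Joint'
--     return ''
-- ===== Notes on version B (the rewrite author's own statement) =====
-- stated objective: faster
-- what changed: Transposes the loop nesting: instead of iterating committees and re-building the three abbreviation lists for three list-membership tests per committee, B precomputes one hash set per chamber and does one any()-scan per chamber label, then applies the same size-based branch.
import Mathlib
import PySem

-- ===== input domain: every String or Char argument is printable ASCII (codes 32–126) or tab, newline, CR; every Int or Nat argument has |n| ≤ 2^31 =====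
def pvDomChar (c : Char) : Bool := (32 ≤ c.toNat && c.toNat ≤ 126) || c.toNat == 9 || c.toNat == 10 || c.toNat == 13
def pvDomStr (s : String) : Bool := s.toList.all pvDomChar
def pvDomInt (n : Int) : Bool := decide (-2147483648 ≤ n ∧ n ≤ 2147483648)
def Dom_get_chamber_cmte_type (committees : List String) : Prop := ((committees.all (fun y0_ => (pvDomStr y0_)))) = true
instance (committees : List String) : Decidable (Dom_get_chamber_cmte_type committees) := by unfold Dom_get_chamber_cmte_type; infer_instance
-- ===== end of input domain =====

-- B transposes the loop nesting (one scan per chamber label over precomputed abbreviation sets)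
-- instead of A's per-committee loop with three inner membership tests; exact same return value.

-- ===== PORT A =====
-- [c['cmte_abbv'] for c in cmte_lookup['lower']] etc. (fixed module-level table)
def pvLowerAbbvs : List String :=
  ["AGR","CPC","COHDWS","CUA","EBM","EDN","EEP","ERB","FIN","HAW","HED",
   "HLT","HSG","HUS","INT","JUD","LAB","LMG","PBM","TOU","TRN","WLO"]
def pvUpperAbbvs : List String :=
  ["AGL","CPN","CSGTF","EDU","EGH","EDT","ENE","HMS","HRE","HTH","HWN","JDL",
   "PGM","PSM","TEC","THA","TIA","TSM","SCA01","SCA02","WAM","WTL","WLH"]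
def pvJointAbbvs : List String := ["ESPO","IFTF","MBTF","SLARS"]

-- one iteration of A's loop body (three independent ifs appending to chambers)
def pvStepA (acc : List String) (committee : String) : List String :=
  let acc := if pvLowerAbbvs.contains committee then acc ++ ["House"] else acc
  let acc := if pvUpperAbbvs.contains committee then acc ++ ["Senate"] else acc
  if pvJointAbbvs.contains committee then acc ++ ["Joint"] else acc

def get_chamber_cmte_type (committees : List String) : String :=
  let chambers : List String := committees.foldl pvStepA []
  let s : PySem.Set String := PySem.Set.ofList chambers   -- chambers = set(chambers)
  if PySem.Set.len s = 1 then s.headD ""                  -- set.pop() on a singleton: exact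
  else if 1 < PySem.Set.len s then "Joint"
  else ""

-- ===== PORT B =====
def get_chamber_cmte_type_alt (committees : List String) : String :=
  let labels : List String :=
    (if committees.any (fun c => PySem.Set.contains (PySem.Set.ofList pvLowerAbbvs) c) then ["House"] else [])
    ++ (if committees.any (fun c => PySem.Set.contains (PySem.Set.ofList pvUpperAbbvs) c) then ["Senate"] else [])
    ++ (if committees.any (fun c => PySem.Set.contains (PySem.Set.ofList pvJointAbbvs) c) then ["Joint"] else [])
  if labels.length = 1 then labels.headD ""
  else if 1 < labels.length then "Joint"
  else ""

-- ===== PRECONDITION & SPEC =====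
def Spec_get_chamber_cmte_type (committees : List String) (out : String) : Prop := out = get_chamber_cmte_type_alt committees
instance (committees : List String) (out : String) : Decidable (Spec_get_chamber_cmte_type committees out) := by unfold Spec_get_chamber_cmte_type; infer_instance

-- ===== CLAIM (what is proved, stated in full; the proofs are below) =====
def Claim_equal_get_chamber_cmte_type : Prop := ∀ (committees : List String), Dom_get_chamber_cmte_type committees → Spec_get_chamber_cmte_type committees (get_chamber_cmte_type committees)

-- ===== LEMMAS AND PROOFS =====

theorem mem_stepA (acc : List String) (c x : String) :
    x ∈ pvStepA acc c ↔ x ∈ acc ∨ (x = "House" ∧ pvLowerAbbvs.contains c = true)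
      ∨ (x = "Senate" ∧ pvUpperAbbvs.contains c = true)
      ∨ (x = "Joint" ∧ pvJointAbbvs.contains c = true) := by
  unfold pvStepA
  split_ifs <;> simp_all

theorem mem_foldA (cs : List String) (acc : List String) (x : String) :
    x ∈ cs.foldl pvStepA acc ↔ x ∈ acc
      ∨ (x = "House" ∧ cs.any (fun c => pvLowerAbbvs.contains c) = true)
      ∨ (x = "Senate" ∧ cs.any (fun c => pvUpperAbbvs.contains c) = true)
      ∨ (x = "Joint" ∧ cs.any (fun c => pvJointAbbvs.contains c) = true) := by
  induction cs generalizing acc with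
  | nil => simp
  | cons c cs ih =>
    simp only [List.foldl_cons, ih, mem_stepA, List.any_cons, Bool.or_eq_true]
    tauto

theorem nodup_mem_single {L : List String} {a : String}
    (hnd : L.Nodup) (h : ∀ x, x ∈ L ↔ x = a) : L = [a] := by
  cases L with
  | nil => exact absurd ((h a).mpr rfl) (by simp)
  | cons y ys =>
    have hy : y = a := (h y).mp (by simp)
    subst hy
    have : ys = [] := by
      apply List.eq_nil_iff_forall_not_mem.mpr
      intro x hx
      have := (h x).mp (by simp [hx])
      subst this
      exact (List.nodup_cons.mp hnd).1 hx
    simp [this]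

theorem two_le_len {L : List String} {a b : String}
    (hab : a ≠ b) (ha : a ∈ L) (hb : b ∈ L) : 1 < L.length := by
  cases L with
  | nil => simp at ha
  | cons y ys =>
    cases ys with
    | nil => simp_all
    | cons z zs => simp

theorem contains_set_ofList (xs : List String) (c : String) :
    PySem.Set.contains (PySem.Set.ofList xs) c = xs.contains c := by
  simp [PySem.Set.contains, PySem.Set.mem_ofList]

-- ===== VERDICT (by name: the statement is the Claim_ definition above) =====
theorem get_chamber_cmte_type_spec : Claim_equal_get_chamber_cmte_type := by
  intro committees _
  unfold Spec_get_chamber_cmte_type get_chamber_cmte_type get_chamber_cmte_type_alt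
  simp only [contains_set_ofList]
  set L : List String := PySem.Set.ofList (committees.foldl pvStepA []) with hL
  have hnd : L.Nodup := PySem.Set.nodup_ofList _
  have hmem : ∀ x, x ∈ L ↔
      (x = "House" ∧ committees.any (fun c => pvLowerAbbvs.contains c) = true)
      ∨ (x = "Senate" ∧ committees.any (fun c => pvUpperAbbvs.contains c) = true)
      ∨ (x = "Joint" ∧ committees.any (fun c => pvJointAbbvs.contains c) = true) := by
    intro x
    rw [hL, PySem.Set.mem_ofList, mem_foldA]
    simp
  cases hH : committees.any (fun c => pvLowerAbbvs.contains c) <;>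
  cases hS : committees.any (fun c => pvUpperAbbvs.contains c) <;>
  cases hJ : committees.any (fun c => pvJointAbbvs.contains c) <;>
  simp only [hH, hS, hJ] at hmem ⊢
  · -- none
    have : L = [] := List.eq_nil_iff_forall_not_mem.mpr (fun x hx => by simp [hmem x] at hx)
    simp [this]
  · -- joint only
    have : L = ["Joint"] := nodup_mem_single hnd (fun x => by simp [hmem x])
    simp [this]
  · -- senate only
    have : L = ["Senate"] := nodup_mem_single hnd (fun x => by simp [hmem x])
    simp [this]
  · -- senate+joint
    have h2 : 1 < L.length :=
      two_le_len (by decide) ((hmem "Senate").mpr (by simp)) ((hmem "Joint").mpr (by simp))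
    simp [Nat.ne_of_gt h2, h2]
  · -- house only
    have : L = ["House"] := nodup_mem_single hnd (fun x => by simp [hmem x])
    simp [this]
  · -- house+joint
    have h2 : 1 < L.length :=
      two_le_len (by decide) ((hmem "House").mpr (by simp)) ((hmem "Joint").mpr (by simp))
    simp [Nat.ne_of_gt h2, h2]
  · -- house+senate
    have h2 : 1 < L.length :=
      two_le_len (by decide) ((hmem "House").mpr (by simp)) ((hmem "Senate").mpr (by simp))
    simp [Nat.ne_of_gt h2, h2]
  · -- all three
    have h2 : 1 < L.length :=
      two_le_len (by decide) ((hmem "House").mpr (by simp)) ((hmem "Senate").mpr (by simp))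
    simp [Nat.ne_of_gt h2, h2]
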